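-- pv_equiv track=rewrite | github.com/1Pampu/prueba-tecnica-soy-calidad | ejercicio1.py | get_count_details
-- ===== SOURCE A (Python) =====
-- def get_count_details(matriz : list) -> list:
--     """
--     Esta funcion cuenta la cantidad de numeros unicos y repetidos en una matriz nxn.
--
--     Argumentos: matriz (list) - Matriz nxn de enteros.
--
--     Retorna:
--         Una lista con dos elementos:
--         - El primer elemento es la cantidad de numeros que aparecen solo una vez.
--         - El segundo elemento es la cantidad de numeros que aparecen mas de una vez.
--     """
--
--     # Lo primero que se me ocurrio fue hacer una lista para guardar todos los
--     # numeros y otra lista que almacene el conteo de cada numero para luego filtrar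
--     # cuantos numeros no repetidos hay. Otra opcion seria usar un diccionario
--     # para almacenar los numeros y su conteo en una unica variable.
--
--     numeros_list = []
--     conteo = []
--
--     # Luego solo debo recorrer la matriz y verificar si el numero que se esta
--     # iterando ya esta en la lista de numeros, si no esta se agrega y se suma
--     # uno al conteo, si ya esta se suma uno al conteo de ese numero revisando
--     # cual es su index.
--
--     for fila in matriz:
--         for numero in fila:
--             if numero not in numeros_list:
--                 numeros_list.append(numero)
--                 conteo.append(1)
--             else:
--                 conteo[numeros_list.index(numero)] += 1
--
--     # Finalmente solo debo contar cuantos numeros tienen un conteo de 1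
--     # para saber cuantos numeros unicos hay en la matriz y retornarlo.
--     # En este punto me di cuenta que no solo tengo el conteo de los numeros
--     # unicos, sino tambien el conteo de los numeros repetidos, por lo que
--     # solo debo agregar otro contador para los numeros repetidos y retornar ambos.
--
--     unicos = 0
--     repetidos = 0
--     for numero in conteo:
--         if numero == 1:
--             unicos += 1
--         else:
--             repetidos += 1
--
--     return [unicos, repetidos]
-- ===== SOURCE B (Python) =====
-- def get_count_details(matriz : list) -> list:
--     # Sort the flattened matrix, then scan it once classifying each run of
--     # equal values: a run of length 1 is a unique number, longer runs repeated.
--     nums = sorted(num for fila in matriz for num in fila)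
--     unicos = 0
--     repetidos = 0
--     i = 0
--     n = len(nums)
--     while i < n:
--         j = i + 1
--         while j < n and nums[j] == nums[i]:
--             j += 1
--         if j - i == 1:
--             unicos += 1
--         else:
--             repetidos += 1
--         i = j
--     return [unicos, repetidos]
-- ===== Notes on version B (the rewrite author's own statement) =====
-- stated objective: faster
-- what changed: Replaces A's per-element membership test and list.index inner scans over parallel lists (plus a second classification loop over the counts) by sorting the flattened matrix once and classifying runs of equal values in a single linear scan.
import Mathlib
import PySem

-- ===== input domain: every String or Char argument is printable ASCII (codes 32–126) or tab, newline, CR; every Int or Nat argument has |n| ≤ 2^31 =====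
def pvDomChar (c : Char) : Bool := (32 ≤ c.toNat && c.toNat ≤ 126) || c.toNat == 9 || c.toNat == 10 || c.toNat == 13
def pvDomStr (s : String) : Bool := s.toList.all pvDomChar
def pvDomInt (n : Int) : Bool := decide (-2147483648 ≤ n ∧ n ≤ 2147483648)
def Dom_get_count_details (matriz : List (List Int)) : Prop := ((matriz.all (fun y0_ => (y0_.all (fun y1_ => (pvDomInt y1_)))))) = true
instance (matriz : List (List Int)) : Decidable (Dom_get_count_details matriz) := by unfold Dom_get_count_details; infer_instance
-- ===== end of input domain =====

-- B sorts the flattened matrix and classifies runs of equal values in one scan,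
-- instead of A's list-scan counting; return values are proved equal for every integer matrix.

-- ===== PORT A =====
-- one loop step: numero against the (numeros_list, conteo) state
def gcdStep (st : List Int × List Int) (numero : Int) : List Int × List Int :=
  if numero ∉ st.1 then (st.1 ++ [numero], st.2 ++ [1])
  else
    match PySem.List.index? st.1 numero with
    | some i => (st.1, st.2.set i (st.2.getD i 0 + 1))  -- i is a valid index (numero ∈ st.1), getD default unreachable
    | none => st                                        -- unreachable: numero ∈ st.1

def get_count_details (matriz : List (List Int)) : List Int :=
  let st := matriz.foldl (fun st fila => fila.foldl gcdStep st) ([], [])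
  let ur := st.2.foldl (fun (ur : Int × Int) c => if c == 1 then (ur.1 + 1, ur.2) else (ur.1, ur.2 + 1)) (0, 0)
  [ur.1, ur.2]

-- ===== PORT B =====
-- the while loops: split off the first run of equal values, classify it, recurse on the rest
def runScan : List Int → Int × Int
  | [] => (0, 0)
  | x :: rest =>
    let run := rest.takeWhile (fun y => y == x)
    let tail := rest.dropWhile (fun y => y == x)
    let p := runScan tail
    if run.length = 0 then (p.1 + 1, p.2) else (p.1, p.2 + 1)
termination_by l => l.length
decreasing_by
  simpa using Nat.lt_succ_of_le (List.dropWhile_sublist _).length_le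

def get_count_details_alt (matriz : List (List Int)) : List Int :=
  let nums := PySem.List.sorted matriz.flatten (fun x => x) false
  let p := runScan nums
  [p.1, p.2]

-- ===== PRECONDITION & SPEC =====
def Spec_get_count_details (matriz : List (List Int)) (out : List Int) : Prop := out = get_count_details_alt matriz
instance (matriz : List (List Int)) (out : List Int) : Decidable (Spec_get_count_details matriz out) := by unfold Spec_get_count_details; infer_instance

-- ===== CLAIM (what is proved, stated in full; the proofs are below) =====
def Claim_equal_get_count_details : Prop := ∀ (matriz : List (List Int)), Dom_get_count_details matriz → Spec_get_count_details matriz (get_count_details matriz)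

-- ===== LEMMAS AND PROOFS =====

-- both of A's nested loops are folds over the flattened matrix
lemma foldl_nested {α : Type} (f : α → Int → α) (init : α) (m : List (List Int)) :
    m.foldl (fun s fila => fila.foldl f s) init = m.flatten.foldl f init := by
  induction m generalizing init with
  | nil => rfl
  | cons h t ih => simp [List.flatten_cons, List.foldl_append, ih]

lemma index?_of_mem (s : List Int) (x : Int) (hx : x ∈ s) :
    PySem.List.index? s x = some (s.idxOf x) := by
  induction s with
  | nil => cases hx
  | cons a t ih =>
    by_cases hax : a = x
    · subst hax; rw [PySem.List.index?_cons_self, List.idxOf_cons_self]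
    · have hxt : x ∈ t := (List.mem_cons.mp hx).resolve_left (fun h => hax h.symm)
      rw [PySem.List.index?_cons_of_ne t hax, ih hxt, List.idxOf_cons_ne t hax]
      simp

lemma map_getD_idxOf (ks : List Int) (f : Int → Int) (x : Int) (hx : x ∈ ks) :
    (ks.map f).getD (ks.idxOf x) 0 = f x := by
  have h : ks.idxOf x < ks.length := List.idxOf_lt_length_of_mem hx
  rw [List.getD_eq_getElem _ _ (by simpa using h)]
  simp [List.getElem_idxOf h]

lemma map_set_idxOf (ks : List Int) (f g : Int → Int) (x : Int) (w : Int)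
    (hx : x ∈ ks) (hn : ks.Nodup)
    (hgx : g x = w) (hg : ∀ k ∈ ks, k ≠ x → g k = f k) :
    (ks.map f).set (ks.idxOf x) w = ks.map g := by
  induction ks with
  | nil => cases hx
  | cons a t ih =>
    rcases List.nodup_cons.mp hn with ⟨hat, hnt⟩
    by_cases hax : a = x
    · subst hax
      simp only [List.idxOf_cons_self, List.map_cons, List.set_cons_zero, hgx]
      congr 1
      exact (List.map_congr_left fun k hk => (hg k (List.mem_cons_of_mem _ hk)
        (fun h => hat (h ▸ hk))).symm)
    · have hxt : x ∈ t := (List.mem_cons.mp hx).resolve_left (fun h => hax h.symm)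
      rw [List.idxOf_cons_ne t hax]
      simp only [List.map_cons, List.set_cons_succ]
      rw [ih hxt hnt (fun k hk hkx => hg k (List.mem_cons_of_mem _ hk) hkx)]
      rw [hg a (List.mem_cons_self ..) hax]

-- A's first loop computes (distinct values in order, their counts)
lemma a_state (fl : List Int) :
    fl.foldl gcdStep ([], []) =
      (PySem.Set.ofList fl, (PySem.Set.ofList fl).map (fun k => (fl.count k : Int))) := by
  induction fl using List.reverseRecOn with
  | nil => rfl
  | append_singleton l x ih =>
    rw [List.foldl_append, List.foldl_cons, List.foldl_nil, ih]
    by_cases hx : x ∈ l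
    · have hmem : x ∈ PySem.Set.ofList l := (PySem.Set.mem_ofList l x).mpr hx
      have hset : PySem.Set.ofList (l ++ [x]) = PySem.Set.ofList l := by
        rw [PySem.Set.ofList_append_singleton, PySem.Set.add_of_mem hmem]
      rw [gcdStep, if_neg (not_not_intro hmem)]
      rw [index?_of_mem _ _ hmem]
      simp only
      rw [hset]
      congr 1
      rw [map_getD_idxOf _ _ _ hmem]
      refine map_set_idxOf _ _ _ _ _ hmem (PySem.Set.nodup_ofList l) ?_ ?_
      · simp [List.count_append]
      · intro k hk hkx
        simp [List.count_append, Ne.symm hkx]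
    · have hmem : x ∉ PySem.Set.ofList l := fun h => hx ((PySem.Set.mem_ofList l x).mp h)
      rw [gcdStep, if_pos hmem]
      rw [PySem.Set.ofList_append_singleton, PySem.Set.add_of_not_mem hmem]
      simp only [List.map_append, List.map_cons, List.map_nil, Prod.mk.injEq]
      refine ⟨trivial, ?_⟩
      congr 1
      · exact List.map_congr_left fun k hk => by
          have hkx : k ≠ x := fun h => hmem (h ▸ hk)
          simp [List.count_append, Ne.symm hkx]
      · simp [List.count_append, List.count_eq_zero.mpr hx]

-- A's second loop counts values equal to 1 and the rest
lemma a_classify (cnt : List Int) (u r : Int) :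
    cnt.foldl (fun (ur : Int × Int) c => if c == 1 then (ur.1 + 1, ur.2) else (ur.1, ur.2 + 1)) (u, r) =
      (u + (cnt.countP (fun c => c == 1) : Int),
       r + ((cnt.length : Int) - (cnt.countP (fun c => c == 1) : Int))) := by
  induction cnt generalizing u r with
  | nil => simp
  | cons c t ih =>
    have hle := List.countP_le_length (l := t) (p := fun c => c == 1)
    by_cases hc : c = 1
    · subst hc
      simp only [List.foldl_cons, ih, List.countP_cons, List.length_cons,
        Prod.mk.injEq]
      refine ⟨?_, ?_⟩ <;> (simp only [BEq.rfl, if_true]; push_cast; omega)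
    · have hcf : (c == 1) = false := by simp [hc]
      simp only [List.foldl_cons, hcf, Bool.false_eq_true, if_false, ih, List.countP_cons,
        List.length_cons, Prod.mk.injEq]
      constructor <;> (push_cast [hcf]; omega)

-- B's run scan on a sorted list counts distinct values with count 1 / count ≠ 1
lemma cons_facts (x : Int) (rest : List Int) (hs : (x :: rest).Pairwise (· ≤ ·)) :
    (rest.dropWhile (fun y => y == x)).Pairwise (· ≤ ·) ∧
    x ∉ rest.dropWhile (fun y => y == x) ∧
    (x :: rest).count x = (rest.takeWhile (fun y => y == x)).length + 1 ∧
    (∀ k ∈ rest.dropWhile (fun y => y == x),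
      (x :: rest).count k = (rest.dropWhile (fun y => y == x)).count k) ∧
    (x :: rest).toFinset = insert x (rest.dropWhile (fun y => y == x)).toFinset := by
  have hrest : rest.Pairwise (· ≤ ·) := hs.of_cons
  have hx_le : ∀ y ∈ rest, x ≤ y := fun y hy => List.rel_of_pairwise_cons hs hy
  set tw := rest.takeWhile (fun y => y == x) with htw_def
  set dw := rest.dropWhile (fun y => y == x) with hdw_def
  have htw : ∀ y ∈ tw, y = x := by
    intro y hy
    simpa using (List.mem_takeWhile_imp hy)
  have htail_pw : dw.Pairwise (· ≤ ·) :=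
    List.Pairwise.sublist (List.dropWhile_sublist _) hrest
  have hsplit : tw ++ dw = rest := List.takeWhile_append_dropWhile
  have hxnot : x ∉ dw := by
    intro hmem
    cases htail : dw with
    | nil => rw [htail] at hmem; cases hmem
    | cons y t =>
      have hnil : dw ≠ [] := by rw [htail]; simp
      have hne := List.head_dropWhile_not _ (hdw_def ▸ hnil)
      simp only [← hdw_def] at hne
      simp only [htail, List.head_cons] at hne
      have hyx : y ≠ x := by simpa using hne
      have hy_rest : y ∈ rest := (List.dropWhile_sublist _).mem (htail ▸ List.mem_cons_self ..)
      have hxy : x < y := lt_of_le_of_ne (hx_le y hy_rest) (Ne.symm hyx)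
      rw [htail] at hmem htail_pw
      rcases List.mem_cons.mp hmem with h | h
      · exact hyx h.symm
      · have : y ≤ x := List.rel_of_pairwise_cons htail_pw h
        omega
  refine ⟨htail_pw, hxnot, ?_, ?_, ?_⟩
  · rw [List.count_cons_self]
    have hrc : rest.count x = tw.count x + dw.count x := by
      conv_lhs => rw [← hsplit]
      rw [List.count_append]
    have h1 : tw.count x = tw.length :=
      List.count_eq_length.mpr (fun b hb => (htw b hb).symm)
    have h2 : dw.count x = 0 := List.count_eq_zero.mpr hxnot
    omega
  · intro k hk
    have hkx : k ≠ x := fun h => hxnot (h ▸ hk)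
    rw [List.count_cons_of_ne (Ne.symm hkx)]
    have hrc : rest.count k = tw.count k + dw.count k := by
      conv_lhs => rw [← hsplit]
      rw [List.count_append]
    have : tw.count k = 0 := List.count_eq_zero.mpr (fun h => hkx (htw k h))
    omega
  · have hmem_iff : ∀ a, a ∈ rest ↔ a ∈ tw ++ dw := fun a => by rw [hsplit]
    ext a
    simp only [List.toFinset_cons, Finset.mem_insert, List.mem_toFinset, hmem_iff,
      List.mem_append]
    constructor
    · rintro (h | h | h)
      · exact Or.inl h
      · exact Or.inl (htw a h)
      · exact Or.inr h
    · rintro (h | h)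
      · exact Or.inl h
      · exact Or.inr (Or.inr h)

lemma runScan_sorted (l : List Int) (hs : l.Pairwise (· ≤ ·)) :
    runScan l = (((l.toFinset.filter (fun k => l.count k = 1)).card : Int),
                 ((l.toFinset.filter (fun k => l.count k ≠ 1)).card : Int)) := by
  induction l using runScan.induct with
  | case1 => simp [runScan]
  | case2 x rest run tail hrun ih =>
    obtain ⟨hpw, hxnot, hcx, hck, hfin⟩ := cons_facts x rest hs
    rw [runScan]
    have hrun' : (rest.takeWhile (fun y => y == x)).length = 0 := hrun
    have ih' : runScan (rest.dropWhile (fun y => y == x)) =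
        ((((rest.dropWhile (fun y => y == x)).toFinset.filter
            (fun k => (rest.dropWhile (fun y => y == x)).count k = 1)).card : Int),
         (((rest.dropWhile (fun y => y == x)).toFinset.filter
            (fun k => (rest.dropWhile (fun y => y == x)).count k ≠ 1)).card : Int)) := ih hpw
    rw [if_pos hrun', ih']
    have hxfin : x ∉ (rest.dropWhile (fun y => y == x)).toFinset := by
      simpa using hxnot
    have hcx1 : (x :: rest).count x = 1 := by omega
    have hcongr : ∀ (p : Nat → Prop) (_ : DecidablePred p),
        (rest.dropWhile (fun y => y == x)).toFinset.filter (fun k => p ((x :: rest).count k)) =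
        (rest.dropWhile (fun y => y == x)).toFinset.filter (fun k => p ((rest.dropWhile (fun y => y == x)).count k)) := by
      intro p _
      exact Finset.filter_congr (fun k hk => by rw [hck k (List.mem_toFinset.mp hk)])
    rw [hfin, Finset.filter_insert, Finset.filter_insert, if_pos hcx1, if_neg (by omega)]
    rw [hcongr (fun n => n = 1) inferInstance, hcongr (fun n => n ≠ 1) inferInstance]
    rw [Finset.card_insert_of_notMem (fun h => hxfin (Finset.mem_of_mem_filter _ h))]
    push_cast
    ring_nf
  | case3 x rest run tail hrun ih =>
    obtain ⟨hpw, hxnot, hcx, hck, hfin⟩ := cons_facts x rest hs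
    rw [runScan]
    have hrun' : (rest.takeWhile (fun y => y == x)).length ≠ 0 := hrun
    have ih' : runScan (rest.dropWhile (fun y => y == x)) =
        ((((rest.dropWhile (fun y => y == x)).toFinset.filter
            (fun k => (rest.dropWhile (fun y => y == x)).count k = 1)).card : Int),
         (((rest.dropWhile (fun y => y == x)).toFinset.filter
            (fun k => (rest.dropWhile (fun y => y == x)).count k ≠ 1)).card : Int)) := ih hpw
    rw [if_neg hrun', ih']
    have hxfin : x ∉ (rest.dropWhile (fun y => y == x)).toFinset := by
      simpa using hxnot
    have hcx1 : (x :: rest).count x ≠ 1 := by omega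
    have hcongr : ∀ (p : Nat → Prop) (_ : DecidablePred p),
        (rest.dropWhile (fun y => y == x)).toFinset.filter (fun k => p ((x :: rest).count k)) =
        (rest.dropWhile (fun y => y == x)).toFinset.filter (fun k => p ((rest.dropWhile (fun y => y == x)).count k)) := by
      intro p _
      exact Finset.filter_congr (fun k hk => by rw [hck k (List.mem_toFinset.mp hk)])
    rw [hfin, Finset.filter_insert, Finset.filter_insert, if_neg (by omega), if_pos hcx1]
    rw [hcongr (fun n => n = 1) inferInstance, hcongr (fun n => n ≠ 1) inferInstance]
    rw [Finset.card_insert_of_notMem (fun h => hxfin (Finset.mem_of_mem_filter _ h))]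
    push_cast
    ring_nf

-- bridge: countP over the nodup distinct-values list is a Finset filter card
lemma countP_ofList_card (fl : List Int) :
    (PySem.Set.ofList fl).countP (fun k => (fl.count k : Int) == 1) =
    (fl.toFinset.filter (fun k => fl.count k = 1)).card := by
  have hnd : (PySem.Set.ofList fl).Nodup := PySem.Set.nodup_ofList fl
  have hfin : (PySem.Set.ofList fl).toFinset = fl.toFinset := by
    ext a; simp [PySem.Set.mem_ofList]
  have h1 : fl.toFinset.filter (fun k => fl.count k = 1)
      = ((PySem.Set.ofList fl).filter (fun k => (fl.count k : Int) == 1)).toFinset := by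
    rw [List.toFinset_filter, hfin]
    exact (Finset.filter_congr (fun k _ => by simp)).symm
  rw [h1, List.toFinset_card_of_nodup (hnd.filter _), List.countP_eq_length_filter]

lemma ofList_length_card (fl : List Int) :
    (PySem.Set.ofList fl).length = fl.toFinset.card := by
  have hfin : (PySem.Set.ofList fl).toFinset = fl.toFinset := by
    ext a; simp [PySem.Set.mem_ofList]
  rw [← hfin, List.toFinset_card_of_nodup (PySem.Set.nodup_ofList fl)]

-- ===== VERDICT (by name: the statement is the Claim_ definition above) =====
theorem get_count_details_spec : Claim_equal_get_count_details := by
  intro matriz _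
  unfold Spec_get_count_details get_count_details get_count_details_alt
  rw [foldl_nested, a_state]
  simp only
  rw [a_classify]
  have hpw : (PySem.List.sorted matriz.flatten (fun x => x) false).Pairwise (· ≤ ·) := by
    simpa using PySem.List.sorted_pairwise (xs := matriz.flatten) (key := fun x => x)
  have hperm : (PySem.List.sorted matriz.flatten (fun x => x) false).Perm matriz.flatten :=
    PySem.List.sorted_perm matriz.flatten (fun x => x) false
  rw [runScan_sorted _ hpw]
  have hfin := List.toFinset_eq_of_perm _ _ hperm
  have hflt : ∀ (P : Nat → Prop) (_ : DecidablePred P),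
      (PySem.List.sorted matriz.flatten (fun x => x) false).toFinset.filter
        (fun k => P ((PySem.List.sorted matriz.flatten (fun x => x) false).count k)) =
      matriz.flatten.toFinset.filter (fun k => P (matriz.flatten.count k)) := by
    intro P _
    rw [hfin]
    exact Finset.filter_congr (fun k _ => by rw [hperm.count_eq])
  rw [hflt (fun n => n = 1) inferInstance, hflt (fun n => n ≠ 1) inferInstance]
  rw [List.countP_map]
  have hu : ((PySem.Set.ofList matriz.flatten).countP
      ((fun c => c == 1) ∘ fun k => ((matriz.flatten.count k : Int)))) =
      (matriz.flatten.toFinset.filter (fun k => matriz.flatten.count k = 1)).card :=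
    countP_ofList_card matriz.flatten
  have hl := ofList_length_card matriz.flatten
  have hsum := Finset.card_filter_add_card_filter_not
    (fun k => matriz.flatten.count k = 1) (s := matriz.flatten.toFinset)
  simp only [List.cons.injEq, and_true]
  rw [hu, List.length_map, hl]
  constructor
  · omega
  · simp only [ne_eq]
    omega
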